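-- pv_equiv track=rewrite | github.com/grouchyseafowl/Autograder4Canvas | src/insights/class_reader.py | _group_by_cluster
-- ===== SOURCE A (Python) =====
-- from typing import Dict, List, Optional, Set, Tuple
--
-- def _group_by_cluster(
--     submissions: Dict[str, str],
--     names: Dict[str, str],
--     cluster_assignments: Dict[str, int],
--     max_group_size: int = 8,
-- ) -> List[Tuple[int, List[Tuple[str, str]]]]:
--     """Group students by embedding cluster for hierarchical reading.
--
--     Returns list of (cluster_id, [(sid, name), ...]) tuples.
--     Groups larger than max_group_size are split.
--     Students without cluster assignments go in cluster -1.
--     """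
--     clusters: Dict[int, List[Tuple[str, str]]] = {}
--     for sid in submissions:
--         cid = cluster_assignments.get(sid, -1)
--         name = names.get(sid, f"Student {sid}")
--         clusters.setdefault(cid, []).append((sid, name))
--
--     # Split oversized groups
--     result: List[Tuple[int, List[Tuple[str, str]]]] = []
--     for cid, members in sorted(clusters.items()):
--         for i in range(0, len(members), max_group_size):
--             result.append((cid, members[i : i + max_group_size]))
--
--     return result
-- ===== SOURCE B (Python) =====
-- def _group_by_cluster(
--     submissions,
--     names,
--     cluster_assignments,
--     max_group_size=8,
-- ):
--     """Sort-then-scan regrouping: no intermediate dict.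
--
--     Build a flat record list (cid, (sid, name)), stably sort it by cid alone
--     (preserving submission order within a cluster), cut it into consecutive
--     equal-cid runs, then emit max_group_size-sized chunks of each run.
--     """
--     records = [
--         (cluster_assignments.get(sid, -1), (sid, names.get(sid, f"Student {sid}")))
--         for sid in submissions
--     ]
--     records.sort(key=lambda r: r[0])  # stable; sort by cid ONLY
--
--     # Cut the sorted records into consecutive runs of equal cid.
--     groups = []
--     while records:
--         cid = records[0][0]
--         cnt = 0
--         while cnt < len(records) and records[cnt][0] == cid:
--             cnt += 1
--         groups.append((cid, [m for _, m in records[:cnt]]))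
--         records = records[cnt:]
--
--     result = []
--     for cid, members in groups:
--         for i in range(0, len(members), max_group_size):
--             result.append((cid, members[i : i + max_group_size]))
--     return result
-- ===== Notes on version B (the rewrite author's own statement) =====
-- stated objective: alternative
-- what changed: Replaces A's hash-grouping dict (setdefault/append, then key-sort of the items) with a flat (cid, (sid, name)) record list that is stably sorted by cid alone and cut into consecutive equal-cid runs, so the intermediate dict disappears.
import Mathlib
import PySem

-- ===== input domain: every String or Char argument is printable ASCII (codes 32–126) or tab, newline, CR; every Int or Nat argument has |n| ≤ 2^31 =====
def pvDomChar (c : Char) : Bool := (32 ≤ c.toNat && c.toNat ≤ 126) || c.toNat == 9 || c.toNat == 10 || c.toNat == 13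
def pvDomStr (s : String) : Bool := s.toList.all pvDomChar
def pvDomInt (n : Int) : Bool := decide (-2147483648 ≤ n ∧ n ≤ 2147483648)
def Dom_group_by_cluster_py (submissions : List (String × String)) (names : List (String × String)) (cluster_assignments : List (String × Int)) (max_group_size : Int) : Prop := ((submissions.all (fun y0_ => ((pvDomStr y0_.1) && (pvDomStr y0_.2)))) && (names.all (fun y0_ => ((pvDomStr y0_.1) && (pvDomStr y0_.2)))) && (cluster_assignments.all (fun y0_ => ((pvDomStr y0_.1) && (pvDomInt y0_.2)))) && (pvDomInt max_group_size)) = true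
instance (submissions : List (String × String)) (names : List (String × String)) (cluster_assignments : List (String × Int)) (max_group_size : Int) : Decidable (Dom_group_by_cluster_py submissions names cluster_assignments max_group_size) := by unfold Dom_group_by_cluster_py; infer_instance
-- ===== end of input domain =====

-- B replaces A's hash-grouping dict with a flat record list stably sorted by cluster id and cut
-- into consecutive equal-id runs (objective: alternative; same cost, no intermediate dict).

-- ===== PORT A =====
-- `sorted(clusters.items())` compares (int, list) tuples; the dict's keys are unique, so the
-- comparison is always decided by the first component — ported as a stable sort keyed on it.
def group_by_cluster_py (submissions : List (String × String)) (names : List (String × String)) (cluster_assignments : List (String × Int)) (max_group_size : Int) : List (Int × (List (String × String))) :=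
  let namesD := PySem.Dict.ofList names
  let caD := PySem.Dict.ofList cluster_assignments
  -- for sid in submissions: clusters.setdefault(cid, []).append((sid, name))
  let clusters : PySem.Dict Int (List (String × String)) :=
    submissions.foldl (fun d p =>
      d.modify (caD.getD p.1 (-1)) []
        (fun v => v ++ [(p.1, namesD.getD p.1 ("Student " ++ p.1))])) PySem.Dict.empty
  (PySem.List.sorted clusters.items (fun it => it.1)).foldl (fun result it =>
      (PySem.List.pyRange 0 (it.2.length : Int) max_group_size).foldl (fun res i =>
        res ++ [(it.1, PySem.List.slice it.2 (some i) (some (i + max_group_size)))]) result) []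

-- ===== PORT B =====
-- the `while records:` loop of Source B: cut the sorted record list into consecutive equal-cid runs
def pvRuns : List (Int × (String × String)) → List (Int × List (String × String))
  | [] => []
  | (c, m) :: rest =>
      (c, m :: (rest.takeWhile (fun r => r.1 == c)).map (fun r => r.2)) ::
        pvRuns (rest.dropWhile (fun r => r.1 == c))
  termination_by l => l.length
  decreasing_by
    have := List.length_dropWhile_le (fun r => r.1 == c) rest
    simp; omega

def group_by_cluster_py_alt (submissions : List (String × String)) (names : List (String × String)) (cluster_assignments : List (String × Int)) (max_group_size : Int) : List (Int × (List (String × String))) :=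
  let namesD := PySem.Dict.ofList names
  let caD := PySem.Dict.ofList cluster_assignments
  let records : List (Int × (String × String)) :=
    submissions.map (fun p => (caD.getD p.1 (-1), (p.1, namesD.getD p.1 ("Student " ++ p.1))))
  let groups := pvRuns (PySem.List.sorted records (fun r => r.1))
  groups.foldl (fun result g =>
      (PySem.List.pyRange 0 (g.2.length : Int) max_group_size).foldl (fun res i =>
        res ++ [(g.1, PySem.List.slice g.2 (some i) (some (i + max_group_size)))]) result) []

-- ===== PRECONDITION & SPEC =====
-- Pre_ excludes only the inputs where A raises: range(0, len, 0) is a ValueError, reached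
-- exactly when max_group_size = 0 and some cluster group exists (i.e. submissions ≠ []).
def Pre_group_by_cluster_py (submissions : List (String × String)) (names : List (String × String)) (cluster_assignments : List (String × Int)) (max_group_size : Int) : Prop :=
  submissions = [] ∨ max_group_size ≠ 0
instance (submissions : List (String × String)) (names : List (String × String)) (cluster_assignments : List (String × Int)) (max_group_size : Int) : Decidable (Pre_group_by_cluster_py submissions names cluster_assignments max_group_size) := by unfold Pre_group_by_cluster_py; infer_instance

def pvWitness_group_by_cluster_py : (List (String × String)) × (List (String × String)) × (List (String × Int)) × Int :=
  ([("s1", "code1"), ("s2", "code2"), ("s3", "code3")], [("s1", "Ann")], [("s2", 1), ("s3", 1)], 1)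

def Spec_group_by_cluster_py (submissions : List (String × String)) (names : List (String × String)) (cluster_assignments : List (String × Int)) (max_group_size : Int) (out : List (Int × (List (String × String)))) : Prop := out = group_by_cluster_py_alt submissions names cluster_assignments max_group_size
instance (submissions : List (String × String)) (names : List (String × String)) (cluster_assignments : List (String × Int)) (max_group_size : Int) (out : List (Int × (List (String × String)))) : Decidable (Spec_group_by_cluster_py submissions names cluster_assignments max_group_size out) := by unfold Spec_group_by_cluster_py; infer_instance

-- ===== CLAIM (what is proved, stated in full; the proofs are below) =====
def Claim_equal_group_by_cluster_py : Prop := ∀ (submissions : List (String × String)) (names : List (String × String)) (cluster_assignments : List (String × Int)) (max_group_size : Int), Dom_group_by_cluster_py submissions names cluster_assignments max_group_size → Pre_group_by_cluster_py submissions names cluster_assignments max_group_size → Spec_group_by_cluster_py submissions names cluster_assignments max_group_size (group_by_cluster_py submissions names cluster_assignments max_group_size)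

-- ===== LEMMAS AND PROOFS =====

-- the consecutive run keys of the record list (proof-only helper; mirrors pvRuns's recursion)
def pvKeys : List (Int × (String × String)) → List Int
  | [] => []
  | (c, _) :: rest => c :: pvKeys (rest.dropWhile (fun r => r.1 == c))
  termination_by l => l.length
  decreasing_by
    have := List.length_dropWhile_le (fun r => r.1 == c) rest
    simp; omega

theorem pvKeys_subset {G : List (Int × (String × String))} {x : Int}
    (h : x ∈ pvKeys G) : x ∈ G.map (fun r => r.1) := by
  induction G using pvKeys.induct with
  | case1 => simp [pvKeys] at h
  | case2 c m rest ih =>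
    rw [pvKeys] at h
    rcases List.mem_cons.mp h with h | h
    · simp [h]
    · have hx := ih h
      have hs : ((rest.dropWhile (fun r => r.1 == c)).map (fun r => r.1)).Sublist
          (rest.map fun r => r.1) := (List.dropWhile_sublist _).map _
      exact List.mem_cons.mpr (Or.inr (hs.mem hx))

theorem pv_dropWhile_gt {c : Int} {rest : List (Int × (String × String))}
    (hc : ∀ r ∈ rest, c ≤ r.1) (hp : rest.Pairwise (fun a b => a.1 ≤ b.1))
    {x : Int × (String × String)} (hx : x ∈ rest.dropWhile (fun r => r.1 == c)) :
    c < x.1 := by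
  induction rest with
  | nil => simp at hx
  | cons r rest' ih =>
    rw [List.dropWhile_cons] at hx
    by_cases hr : (r.1 == c) = true
    · rw [if_pos hr] at hx
      exact ih (fun s hs => hc s (List.mem_cons_of_mem r hs)) hp.of_cons hx
    · rw [if_neg hr] at hx
      have hne : r.1 ≠ c := by simpa using hr
      have h1 := hc r (List.mem_cons_self ..)
      have hrc : c < r.1 := by omega
      rcases List.mem_cons.mp hx with rfl | hx'
      · exact hrc
      · exact lt_of_lt_of_le hrc ((List.pairwise_cons.mp hp).1 x hx')

theorem pv_filter_eq_takeWhile {c : Int} {rest : List (Int × (String × String))}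
    (hc : ∀ r ∈ rest, c ≤ r.1) (hp : rest.Pairwise (fun a b => a.1 ≤ b.1)) :
    rest.filter (fun r => r.1 == c) = rest.takeWhile (fun r => r.1 == c) := by
  induction rest with
  | nil => rfl
  | cons r rest' ih =>
    by_cases hr : (r.1 == c) = true
    · simp only [List.filter_cons, List.takeWhile_cons, if_pos hr]
      rw [ih (fun s hs => hc s (List.mem_cons_of_mem r hs)) hp.of_cons]
    · simp only [List.filter_cons, List.takeWhile_cons, if_neg hr]
      apply List.filter_eq_nil_iff.mpr
      intro a ha
      have hne : r.1 ≠ c := by simpa using hr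
      have h1 := hc r (List.mem_cons_self ..)
      have hrc : c < r.1 := by omega
      have : c < a.1 := lt_of_lt_of_le hrc ((List.pairwise_cons.mp hp).1 a ha)
      simp; omega

theorem pv_filter_hi {c c' : Int} {rest : List (Int × (String × String))}
    (hcc : c ≠ c') :
    ((rest.takeWhile (fun r => r.1 == c)).filter (fun r => r.1 == c')) = [] := by
  apply List.filter_eq_nil_iff.mpr
  intro a ha
  have := List.mem_takeWhile_imp ha
  simp_all

theorem pvKeys_pairwise {G : List (Int × (String × String))}
    (hp : G.Pairwise (fun a b => a.1 ≤ b.1)) : (pvKeys G).Pairwise (· < ·) := by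
  induction G using pvKeys.induct with
  | case1 => simp [pvKeys]
  | case2 c m rest ih =>
    obtain ⟨hc, hp'⟩ := List.pairwise_cons.mp hp
    rw [pvKeys]
    refine List.pairwise_cons.mpr ⟨?_, ih (List.Pairwise.sublist (List.dropWhile_sublist _) hp')⟩
    intro y hy
    obtain ⟨r, hr, rfl⟩ := List.mem_map.mp (pvKeys_subset hy)
    exact pv_dropWhile_gt hc hp' hr

theorem pvKeys_mem_of {x : Int} {G : List (Int × (String × String))}
    (h : x ∈ G.map (fun r => r.1)) : x ∈ pvKeys G := by
  induction G using pvKeys.induct with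
  | case1 => simp at h
  | case2 c m rest ih =>
    rw [pvKeys]
    rcases List.mem_cons.mp h with rfl | h'
    · exact List.mem_cons_self ..
    · obtain ⟨r, hr, rfl⟩ := List.mem_map.mp h'
      rw [← List.takeWhile_append_dropWhile (p := fun r => r.1 == c) (l := rest)] at hr
      rcases List.mem_append.mp hr with ht | hd
      · have := List.mem_takeWhile_imp ht
        simp at this
        simp [this]
      · exact List.mem_cons.mpr (Or.inr (ih (List.mem_map_of_mem hd)))

theorem pvRuns_eq {G : List (Int × (String × String))}
    (hp : G.Pairwise (fun a b => a.1 ≤ b.1)) :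
    pvRuns G = (pvKeys G).map
      (fun c => (c, (G.filter (fun r => r.1 == c)).map (fun r => r.2))) := by
  induction G using pvRuns.induct with
  | case1 => simp [pvRuns, pvKeys]
  | case2 c m rest ih =>
    obtain ⟨hc, hp'⟩ := List.pairwise_cons.mp hp
    have hc' : ∀ r ∈ rest, c ≤ r.1 := hc
    rw [pvRuns, pvKeys, List.map_cons]
    congr 1
    · -- head entry
      simp only [List.filter_cons, show ((c, m).1 == c) = true by simp, if_pos]
      rw [pv_filter_eq_takeWhile hc' hp', List.map_cons]
    · rw [ih (List.Pairwise.sublist (List.dropWhile_sublist _) hp')]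
      apply List.map_congr_left
      intro c' hc'mem
      obtain ⟨r, hr, rfl⟩ := List.mem_map.mp (pvKeys_subset hc'mem)
      have hgt : c < r.1 := pv_dropWhile_gt hc' hp' hr
      congr 1
      -- (dropWhile).filter = ((c,m)::rest).filter for key r.1 > c
      have h1 : List.filter (fun s => s.1 == r.1) ((c, m) :: rest)
          = List.filter (fun s => s.1 == r.1) rest := by
        simp only [List.filter_cons]
        rw [if_neg (by simp; omega)]
      rw [h1, ← List.takeWhile_append_dropWhile (p := fun s => s.1 == c) (l := rest),
        List.filter_append, pv_filter_hi (by omega), List.nil_append,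
        List.takeWhile_append_dropWhile]

theorem pv_insertBy_filter (c : Int) (x : Int × (String × String))
    (ys : List (Int × (String × String))) (hs : ys.Pairwise (fun a b => a.1 ≤ b.1)) :
    (PySem.List.insertBy (fun a b => decide (a.1 < b.1)) x ys).filter (fun r => r.1 == c)
      = ys.filter (fun r => r.1 == c) ++ (if x.1 == c then [x] else []) := by
  induction ys with
  | nil =>
    simp [PySem.List.insertBy, List.filter_cons]
  | cons y ys' ih =>
    rw [PySem.List.insertBy]
    by_cases hlt : (decide (x.1 < y.1)) = true
    · rw [if_pos hlt]
      have hxy : x.1 < y.1 := of_decide_eq_true hlt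
      have hall : ∀ z ∈ y :: ys', x.1 < z.1 := by
        intro z hz
        rcases List.mem_cons.mp hz with rfl | hz'
        · exact hxy
        · exact lt_of_lt_of_le hxy ((List.pairwise_cons.mp hs).1 z hz')
      by_cases hxc : (x.1 == c) = true
      · have hxceq : x.1 = c := by simpa using hxc
        have hnil : (y :: ys').filter (fun r => r.1 == c) = [] := by
          apply List.filter_eq_nil_iff.mpr
          intro a ha
          have := hall a ha
          simp; omega
        rw [List.filter_cons, if_pos hxc, hnil, if_pos hxc]
        rfl
      · rw [List.filter_cons, if_neg hxc, if_neg hxc, List.append_nil]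
    · rw [if_neg hlt]
      rw [List.filter_cons, List.filter_cons, ih (List.Pairwise.of_cons hs)]
      by_cases hyc : (y.1 == c) = true
      · rw [if_pos hyc, if_pos hyc, List.cons_append]
      · rw [if_neg hyc, if_neg hyc]

theorem pv_sorted_filter (l : List (Int × (String × String))) (c : Int) :
    (PySem.List.sorted l (fun r => r.1)).filter (fun r => r.1 == c)
      = l.filter (fun r => r.1 == c) := by
  induction l using List.reverseRecOn with
  | nil => rfl
  | append_singleton l x ih =>
    have h1 : PySem.List.sorted (l ++ [x]) (fun r : Int × (String × String) => r.1)
        = PySem.List.insertBy (fun a b => decide (a.1 < b.1)) x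
            (PySem.List.sorted l (fun r => r.1)) := by
      rw [PySem.List.sorted_eq_foldl_insertBy, PySem.List.sorted_eq_foldl_insertBy,
        List.foldl_append]
      rfl
    rw [h1, pv_insertBy_filter c x _ (PySem.List.sorted_pairwise l (fun r => r.1)), ih,
      List.filter_append, List.filter_cons]
    split <;> rfl

theorem pv_groups_eq (recs : List (Int × (String × String))) :
    PySem.List.sorted
        (recs.foldl (fun d r => d.modify r.1 [] (fun v => v ++ [r.2])) PySem.Dict.empty).items
        (fun it => it.1)
      = pvRuns (PySem.List.sorted recs (fun r => r.1)) := by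
  have hGp : (PySem.List.sorted recs (fun r : Int × (String × String) => r.1)).Pairwise
      (fun a b => a.1 ≤ b.1) := PySem.List.sorted_pairwise recs _
  have hGperm := PySem.List.sorted_perm recs (fun r : Int × (String × String) => r.1) false
  set D := recs.foldl (fun d r => d.modify r.1 [] (fun v => v ++ [r.2])) PySem.Dict.empty with hD
  have hnd : D.keys.Nodup :=
    PySem.Dict.nodup_keys_foldl_modify_key recs (fun r => r.1) [] (fun _ r v => v ++ [r.2])
      PySem.Dict.empty (by simp [PySem.Dict.keys_empty])
  have hK : D.keys = PySem.Set.ofList (recs.map (fun r => r.1)) := by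
    have h := PySem.Dict.keys_foldl_modify_key recs (fun r => r.1) [] (fun _ r v => v ++ [r.2])
      PySem.Dict.empty
    beta_reduce at h
    rw [hD, h, PySem.Dict.keys_empty, PySem.Set.update_nil_left]
  have hgetD : ∀ cc, D.getD cc [] = (recs.filter (fun p => p.1 == cc)).map (fun x => x.2) := by
    intro cc
    have h := PySem.Dict.getD_foldl_modify_append recs PySem.Dict.empty cc
    rw [hD]
    simpa [PySem.Dict.getD_empty] using h
  have hval : D.items
      = D.keys.map (fun c => (c, (recs.filter (fun p => p.1 == c)).map (fun x => x.2))) := by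
    rw [PySem.Dict.items_eq_map_keys D hnd []]
    exact List.map_congr_left (fun k _ => by rw [hgetD])
  have hSKlt : (PySem.List.sorted D.keys (fun x => x)).Pairwise (· < ·) := by
    rw [hK]; exact PySem.List.sorted_ofList_pairwise_lt _
  have hLHS : PySem.List.sorted D.items (fun it => it.1)
      = (PySem.List.sorted D.keys (fun x => x)).map
          (fun c => (c, (recs.filter (fun p => p.1 == c)).map (fun x => x.2))) := by
    rw [hval]
    apply PySem.List.sorted_eq_of_perm_of_pairwise_lt
    · exact (PySem.List.sorted_perm D.keys (fun x => x) false).map _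
    · rw [List.pairwise_map]
      simpa using hSKlt
  have hndG : (pvKeys (PySem.List.sorted recs (fun r : Int × (String × String) => r.1))).Nodup :=
    List.Pairwise.imp ne_of_lt (pvKeys_pairwise hGp)
  have hkeysG : pvKeys (PySem.List.sorted recs (fun r : Int × (String × String) => r.1))
      = PySem.List.sorted D.keys (fun x => x) := by
    symm
    apply PySem.List.sorted_eq_of_perm_of_pairwise_lt
    · refine (List.perm_ext_iff_of_nodup hndG hnd).mpr ?_
      intro a
      constructor
      · intro h
        rw [hK, PySem.Set.mem_ofList]
        exact (hGperm.map (fun r => r.1)).mem_iff.mp (pvKeys_subset h)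
      · intro h
        rw [hK, PySem.Set.mem_ofList] at h
        exact pvKeys_mem_of ((hGperm.map (fun r => r.1)).mem_iff.mpr h)
    · exact pvKeys_pairwise hGp
  rw [hLHS, pvRuns_eq hGp, hkeysG]
  apply List.map_congr_left
  intro c _
  rw [pv_sorted_filter]

-- ===== VERDICT (by name: the statement is the Claim_ definition above) =====
theorem group_by_cluster_py_spec : Claim_equal_group_by_cluster_py := by
  intro submissions names cluster_assignments max_group_size _ _
  unfold Spec_group_by_cluster_py group_by_cluster_py group_by_cluster_py_alt
  dsimp only
  have hfold : submissions.foldl (fun d p =>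
        PySem.Dict.modify d ((PySem.Dict.ofList cluster_assignments).getD p.1 (-1)) []
          (fun v => v ++ [(p.1, (PySem.Dict.ofList names).getD p.1 ("Student " ++ p.1))]))
        PySem.Dict.empty
      = ((submissions.map (fun p : String × String =>
            ((PySem.Dict.ofList cluster_assignments).getD p.1 (-1),
              (p.1, (PySem.Dict.ofList names).getD p.1 ("Student " ++ p.1))))).foldl
          (fun d r => PySem.Dict.modify d r.1 [] (fun v => v ++ [r.2])) PySem.Dict.empty) := by
    rw [List.foldl_map]
  rw [hfold, pv_groups_eq]
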